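-- pv_equiv track=rewrite | github.com/NikidodikYT/StylistAI | backend/app/api/v1/ai.py | is_category_mismatch
-- ===== SOURCE A (Python) =====
-- def is_category_mismatch(product_name: str, source_category: str) -> bool:
--     """Проверяет категорийное соответствие."""
--     product_lower = product_name.lower()
--     category_lower = source_category.lower()
--
--     if "jacket" in category_lower:
--         wrong_items = [
--             "hoodie", "sweatshirt", "sweater", "pullover",
--             "cardigan", "tshirt", "t-shirt", "shirt",
--             "pants", "jeans", "shorts", "skirt"
--         ]
--         if any(word in product_lower for word in wrong_items):
--             return True
--
--     if any(x in category_lower for x in ["pants", "jeans", "trousers"]):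
--         if any(x in product_lower for x in ["jacket", "coat", "shirt", "hoodie"]):
--             return True
--
--     if "shirt" in category_lower and "shirt" not in product_lower:
--         if any(x in product_lower for x in ["jacket", "coat", "pants", "jeans"]):
--             return True
--
--     return False
-- ===== SOURCE B (Python) =====
-- # B: one shared vocabulary scan builds the sets of garment keywords detected in the product
-- # and the category; the rules become set algebra over those detections, and the redundant
-- # triggers "sweatshirt"/"tshirt"/"t-shirt" (each contains "shirt" as a substring) are dropped.
-- VOCAB = ("jacket", "coat", "hoodie", "sweater", "pullover", "cardigan",
--          "shirt", "pants", "jeans", "shorts", "skirt", "trousers")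
--
--
-- def is_category_mismatch(product_name: str, source_category: str) -> bool:
--     p = product_name.lower()
--     c = source_category.lower()
--     prod = {w for w in VOCAB if w in p}
--     cat = {w for w in VOCAB if w in c}
--     return bool(
--         ("jacket" in cat and prod - {"jacket", "coat", "trousers"})
--         or (cat & {"pants", "jeans", "trousers"} and prod & {"jacket", "coat", "shirt", "hoodie"})
--         or ("shirt" in cat and "shirt" not in prod
--             and prod & {"jacket", "coat", "pants", "jeans"})
--     )
-- ===== Notes on version B (the rewrite author's own statement) =====
-- stated objective: alternative
-- what changed: Instead of testing per-rule keyword lists against the strings, B scans one shared garment vocabulary once to build detection sets for product and category (dropping the redundant triggers sweatshirt/tshirt/t-shirt, which all contain 'shirt'), then decides the mismatch by set algebra (difference/intersection) over those sets.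
import Mathlib
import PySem

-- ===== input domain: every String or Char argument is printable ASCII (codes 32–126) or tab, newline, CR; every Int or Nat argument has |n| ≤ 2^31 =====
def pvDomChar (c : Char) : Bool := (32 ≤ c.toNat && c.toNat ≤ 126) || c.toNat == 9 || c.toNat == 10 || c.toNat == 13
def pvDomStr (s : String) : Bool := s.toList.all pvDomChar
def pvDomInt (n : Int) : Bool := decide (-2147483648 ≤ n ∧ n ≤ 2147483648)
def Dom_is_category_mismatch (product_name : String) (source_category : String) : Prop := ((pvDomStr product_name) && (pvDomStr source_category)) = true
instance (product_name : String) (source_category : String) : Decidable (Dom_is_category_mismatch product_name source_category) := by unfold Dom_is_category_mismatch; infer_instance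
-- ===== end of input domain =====

-- B replaces the per-rule keyword lists by one vocabulary scan into detection sets plus set algebra (objective: alternative decomposition, same cost).

-- ===== PORT A =====
def is_category_mismatch (product_name : String) (source_category : String) : Bool :=
  let product_lower := PySem.Str.lower product_name
  let category_lower := PySem.Str.lower source_category
  if PySem.Str.isIn "jacket" category_lower &&
      ([ "hoodie", "sweatshirt", "sweater", "pullover",
         "cardigan", "tshirt", "t-shirt", "shirt",
         "pants", "jeans", "shorts", "skirt"
       ].any (fun word => PySem.Str.isIn word product_lower)) then true
  else if (["pants", "jeans", "trousers"].any (fun x => PySem.Str.isIn x category_lower)) &&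
      (["jacket", "coat", "shirt", "hoodie"].any (fun x => PySem.Str.isIn x product_lower)) then true
  else if PySem.Str.isIn "shirt" category_lower && !(PySem.Str.isIn "shirt" product_lower) &&
      (["jacket", "coat", "pants", "jeans"].any (fun x => PySem.Str.isIn x product_lower)) then true
  else false

-- ===== PORT B =====
-- one shared garment vocabulary ("sweatshirt"/"tshirt"/"t-shirt" are redundant: each contains "shirt")
def pvVocab : List String :=
  ["jacket", "coat", "hoodie", "sweater", "pullover", "cardigan",
   "shirt", "pants", "jeans", "shorts", "skirt", "trousers"]

def is_category_mismatch_alt (product_name : String) (source_category : String) : Bool :=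
  let p := PySem.Str.lower product_name
  let c := PySem.Str.lower source_category
  let prod : PySem.Set String := PySem.Set.ofList (pvVocab.filter (fun w => PySem.Str.isIn w p))
  let cat : PySem.Set String := PySem.Set.ofList (pvVocab.filter (fun w => PySem.Str.isIn w c))
  (PySem.Set.contains cat "jacket" && !(PySem.Set.diff prod ["jacket", "coat", "trousers"]).isEmpty)
  || (!(PySem.Set.inter cat ["pants", "jeans", "trousers"]).isEmpty
      && !(PySem.Set.inter prod ["jacket", "coat", "shirt", "hoodie"]).isEmpty)
  || (PySem.Set.contains cat "shirt" && !(PySem.Set.contains prod "shirt")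
      && !(PySem.Set.inter prod ["jacket", "coat", "pants", "jeans"]).isEmpty)

-- ===== PRECONDITION & SPEC =====
def Spec_is_category_mismatch (product_name : String) (source_category : String) (out : Bool) : Prop := out = is_category_mismatch_alt product_name source_category
instance (product_name : String) (source_category : String) (out : Bool) : Decidable (Spec_is_category_mismatch product_name source_category out) := by unfold Spec_is_category_mismatch; infer_instance

-- ===== CLAIM =====
def Claim_equal_is_category_mismatch : Prop := ∀ (product_name : String) (source_category : String), Dom_is_category_mismatch product_name source_category → Spec_is_category_mismatch product_name source_category (is_category_mismatch product_name source_category)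

-- ===== LEMMAS AND PROOFS =====
theorem pv_contains_ofList {α : Type} [BEq α] [LawfulBEq α] (l : List α) (x : α) :
    (PySem.Set.ofList l).contains x = l.contains x := by
  rw [Bool.eq_iff_iff]
  simp [PySem.Set.contains, PySem.Set.mem_ofList]

theorem pv_contains_filter {α : Type} [BEq α] [LawfulBEq α] (l : List α) (f : α → Bool) (x : α) :
    (l.filter f).contains x = (l.contains x && f x) := by
  rw [Bool.eq_iff_iff]
  simp [List.mem_filter, and_comm]

theorem pv_diff_isEmpty {α : Type} [BEq α] [LawfulBEq α] (l t : List α) :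
    (PySem.Set.diff (PySem.Set.ofList l) t).isEmpty = l.all (fun x => t.contains x) := by
  rw [Bool.eq_iff_iff]
  simp [PySem.Set.diff, List.isEmpty_iff, List.filter_eq_nil_iff, PySem.Set.mem_ofList]

theorem pv_inter_isEmpty {α : Type} [BEq α] [LawfulBEq α] (l t : List α) :
    (PySem.Set.inter (PySem.Set.ofList l) t).isEmpty = l.all (fun x => !t.contains x) := by
  rw [Bool.eq_iff_iff]
  simp [PySem.Set.inter, List.isEmpty_iff, List.filter_eq_nil_iff, PySem.Set.mem_ofList]

-- "shirt" is a substring of "sweatshirt", "tshirt" and "t-shirt"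
theorem pv_shirt_of_sweatshirt (s : String) (h : PySem.Str.isIn "sweatshirt" s = true) :
    PySem.Str.isIn "shirt" s = true := by
  rw [PySem.Str.isIn_iff_infix] at *
  exact List.IsInfix.trans ⟨['s','w','e','a','t'], [], rfl⟩ h

theorem pv_shirt_of_tshirt (s : String) (h : PySem.Str.isIn "tshirt" s = true) :
    PySem.Str.isIn "shirt" s = true := by
  rw [PySem.Str.isIn_iff_infix] at *
  exact List.IsInfix.trans ⟨['t'], [], rfl⟩ h

theorem pv_shirt_of_t_dash_shirt (s : String) (h : PySem.Str.isIn "t-shirt" s = true) :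
    PySem.Str.isIn "shirt" s = true := by
  rw [PySem.Str.isIn_iff_infix] at *
  exact List.IsInfix.trans ⟨['t','-'], [], rfl⟩ h

-- ===== VERDICT =====
theorem pv_ite_or (b c : Bool) : (if b = true then true else c) = (b || c) := by
  cases b <;> simp

set_option maxHeartbeats 1000000 in
theorem is_category_mismatch_spec : Claim_equal_is_category_mismatch := by
  intro product_name source_category _
  unfold Spec_is_category_mismatch is_category_mismatch is_category_mismatch_alt
  simp only [pv_contains_ofList, pv_contains_filter, pv_diff_isEmpty, pv_inter_isEmpty,
    List.all_filter, pvVocab, List.any_cons, List.any_nil, List.all_cons, List.all_nil,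
    List.contains_cons, List.contains_nil, String.reduceEq, String.reduceBEq, beq_self_eq_true, pv_ite_or,
    Bool.or_true, Bool.or_false, Bool.true_or, Bool.false_or,
    Bool.and_true, Bool.true_and, Bool.and_false, Bool.false_and,
    Bool.not_true, Bool.not_false, decide_true, decide_false, Bool.decide_eq_true]
  by_cases hs : PySem.Str.isIn "shirt" (PySem.Str.lower product_name) = true
  · simp only [hs, Bool.or_true, Bool.true_or, Bool.not_true, Bool.and_false,
      Bool.false_and, Bool.and_true, Bool.true_and, Bool.or_false, Bool.false_or,
      pv_ite_or, String.reduceBEq, Bool.not_and, Bool.not_or, Bool.not_not,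
      Bool.not_false]
  · have hs0 : PySem.Str.isIn "shirt" (PySem.Str.lower product_name) = false :=
      eq_false_of_ne_true hs
    have e2 : PySem.Str.isIn "sweatshirt" (PySem.Str.lower product_name) = false := by
      cases h : PySem.Str.isIn "sweatshirt" (PySem.Str.lower product_name)
      · rfl
      · exact absurd (pv_shirt_of_sweatshirt _ h) hs
    have e6 : PySem.Str.isIn "tshirt" (PySem.Str.lower product_name) = false := by
      cases h : PySem.Str.isIn "tshirt" (PySem.Str.lower product_name)
      · rfl
      · exact absurd (pv_shirt_of_tshirt _ h) hs
    have e7 : PySem.Str.isIn "t-shirt" (PySem.Str.lower product_name) = false := by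
      cases h : PySem.Str.isIn "t-shirt" (PySem.Str.lower product_name)
      · rfl
      · exact absurd (pv_shirt_of_t_dash_shirt _ h) hs
    simp only [hs0, e2, e6, e7, Bool.or_false, Bool.false_or, Bool.not_false,
      Bool.and_true, Bool.true_and, Bool.not_true, Bool.and_false, Bool.false_and,
      Bool.or_true, Bool.true_or, pv_ite_or, String.reduceBEq, Bool.not_and,
      Bool.not_or, Bool.not_not]
    simp only [Bool.or_assoc]
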